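-- pv_equiv track=rewrite | github.com/AdamZhouSE/pythonHomework | Code/CodeRecords/2786/60837/276251.py | comSort
-- ===== SOURCE A (Python) =====
-- def comSort(List):
--     if len(List)==0:
--         return 0
--     newList=[]
--     List[List.index(min(List))]=0
--     for i in range(len(List)):
--         List[i]-=1
--         if List[i]>0:
--             newList.append(List[i])
--     return 1+comSort(newList)
-- ===== SOURCE B (Python) =====
-- def comSort(List):
--     ans = 0
--     for v in sorted(List):
--         ans = min(max(v, 1), ans + 1)
--     return ans
-- ===== Notes on version B (the rewrite author's own statement) =====
-- stated objective: simpler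
-- what changed: A simulates the process round by round (each round rescans the list for the min, zeroes it, decrements every element and rebuilds the list, recursing until empty); B sorts once and computes the round count with a single fold ans = min(max(v,1), ans+1) over the sorted values.
import Mathlib
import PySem

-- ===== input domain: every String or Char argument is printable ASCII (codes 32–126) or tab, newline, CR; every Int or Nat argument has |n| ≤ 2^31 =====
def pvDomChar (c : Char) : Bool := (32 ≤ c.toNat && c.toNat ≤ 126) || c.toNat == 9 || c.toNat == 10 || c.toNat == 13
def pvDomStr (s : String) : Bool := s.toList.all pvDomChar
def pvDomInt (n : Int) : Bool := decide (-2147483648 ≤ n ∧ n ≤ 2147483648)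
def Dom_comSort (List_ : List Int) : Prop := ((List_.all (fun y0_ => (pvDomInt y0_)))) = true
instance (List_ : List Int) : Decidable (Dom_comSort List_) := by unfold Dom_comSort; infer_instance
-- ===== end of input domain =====

-- B replaces A's destructive round-by-round simulation by one fold over sorted(List).
-- A mutates its argument in place (zeroes the min, decrements every slot); B does not — the
-- equivalence proved here is about the RETURN value only.

-- ===== PORT A =====
-- one recursion step of A: zero the first minimum, decrement every slot, keep the positives
def comSortStep (L : List Int) : List Int :=
  ((L.set ((PySem.List.index? L ((PySem.List.min? L (fun x => x)).getD 0)).getD 0) 0).map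
      (fun x => x - 1)).filter (fun x => decide (0 < x))

theorem comSortStep_length_lt (L : List Int) (h : L ≠ []) :
    (comSortStep L).length < L.length := by
  have hmin : ∃ m, PySem.List.min? L (fun x => x) = some m := by
    cases hm : PySem.List.min? L (fun x => x) with
    | none => exact absurd ((PySem.List.min?_eq_none_iff L (fun x => x)).mp hm) h
    | some m => exact ⟨m, rfl⟩
  obtain ⟨m, hm⟩ := hmin
  have hmem : m ∈ L := PySem.List.min?_mem hm
  have hidx : ∃ k, PySem.List.index? L m = some k :=
    Option.isSome_iff_exists.mp ((PySem.List.index?_isSome_iff L m).mpr hmem)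
  obtain ⟨k, hk⟩ := hidx
  obtain ⟨hklt, -, -⟩ := PySem.List.getElem_of_index?_eq_some hk
  unfold comSortStep
  rw [hm]
  simp only [Option.getD_some]
  rw [hk]
  simp only [Option.getD_some]
  have hlen : ((L.set k 0).map (fun x => x - 1)).length = L.length := by simp
  have hmemneg : (-1 : Int) ∈ (L.set k 0).map (fun x => x - 1) := by
    have hk2 : k < (L.set k 0).length := by simpa using hklt
    have h0 : (0 : Int) ∈ L.set k 0 := by
      have hmm := List.getElem_mem hk2
      rwa [List.getElem_set_self] at hmm
    simpa using List.mem_map_of_mem h0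
  calc (((L.set k 0).map (fun x => x - 1)).filter (fun x => decide (0 < x))).length
      < ((L.set k 0).map (fun x => x - 1)).length := by
        rw [List.length_filter_lt_length_iff_exists]
        exact ⟨-1, hmemneg, by decide⟩
    _ = L.length := hlen

def comSort (List_ : List Int) : Int :=
  if List_.length = 0 then 0
  else 1 + comSort (comSortStep List_)
termination_by List_.length
decreasing_by exact comSortStep_length_lt List_ (by intro hnil; simp [hnil] at *)

-- ===== PORT B =====
def comSort_alt (List_ : List Int) : Int :=
  (PySem.List.sorted List_ (fun x => x) false).foldl (fun a v => min (max v 1) (a + 1)) 0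

-- ===== PRECONDITION & SPEC =====
def Spec_comSort (List_ : List Int) (out : Int) : Prop := out = comSort_alt List_
instance (List_ : List Int) (out : Int) : Decidable (Spec_comSort List_ out) := by unfold Spec_comSort; infer_instance

-- ===== CLAIM (what is proved, stated in full; the proofs are below) =====
def Claim_equal_comSort : Prop := ∀ (List_ : List Int), Dom_comSort List_ → Spec_comSort List_ (comSort List_)

-- ===== LEMMAS AND PROOFS =====

-- the fold step
def pvF : Int → Int → Int := fun a v => min (max v 1) (a + 1)

-- arithmetic heart: on a ≤-sorted list t, folding from a ≥ 1 (with a = 1 whenever the head is ≤ 1)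
-- is one more than folding the decremented positive survivors from a - 1.
theorem pv_fold_step (t : List Int) (hs : t.Pairwise (· ≤ ·)) :
    ∀ a : Int, 1 ≤ a → (∀ v, t.head? = some v → v ≤ 1 → a = 1) →
      t.foldl pvF a =
        1 + ((t.map (fun x => x - 1)).filter (fun x => decide (0 < x))).foldl pvF (a - 1) := by
  induction t with
  | nil => intro a _ _; simp
  | cons v r ih =>
    intro a ha hhead
    have hs' : r.Pairwise (· ≤ ·) := hs.tail
    have hvr : ∀ w ∈ r, v ≤ w := fun w hw => List.rel_of_pairwise_cons hs hw
    by_cases hv : 1 < v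
    · have hkeep : (0 : Int) < v - 1 := by omega
      simp only [List.map_cons, List.filter_cons, hkeep, decide_true, if_true, List.foldl_cons]
      have h1 : pvF a v = min v (a + 1) := by unfold pvF; omega
      have h2 : pvF (a - 1) (v - 1) = min v (a + 1) - 1 := by unfold pvF; omega
      rw [h1, h2]
      exact ih hs' (min v (a + 1)) (by omega)
        (fun w hw hw1 => by
          cases r with
          | nil => simp at hw
          | cons w' r' =>
            simp only [List.head?_cons, Option.some.injEq] at hw
            have := hvr w' (by simp)
            omega)
    · have ha1 : a = 1 := hhead v rfl (by omega)
      have h1 : pvF a v = 1 := by unfold pvF; omega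
      rw [List.map_cons, List.filter_cons, if_neg (show ¬(decide ((0:Int) < v - 1) = true) by simp; omega),
        List.foldl_cons, h1, ha1]
      have := ih hs' 1 le_rfl (fun _ _ _ => rfl)
      simpa using this

-- the sorted list of one A-step is the decremented positive survivors of the sorted tail
theorem pv_sorted_step (L : List Int) (m : Int) (t : List Int)
    (hst : PySem.List.sorted L (fun x => x) false = m :: t) :
    PySem.List.sorted (comSortStep L) (fun x => x) false =
      (t.map (fun x => x - 1)).filter (fun x => decide (0 < x)) := by
  -- m is the minimum value of L
  have hperm : (m :: t).Perm L := hst ▸ PySem.List.sorted_perm L (fun x => x) false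
  have hmL : m ∈ L := hperm.mem_iff.mp (by simp)
  have hmin : ∀ y ∈ L, m ≤ y := by
    intro y hy
    exact PySem.List.key_head_sorted_le L (fun x => x) hst y hy
  have hL : L ≠ [] := by rintro rfl; exact (List.not_mem_nil) hmL
  -- the value A computes as min(List) equals m
  have hmv : (PySem.List.min? L (fun x => x)).getD 0 = m := by
    cases hm : PySem.List.min? L (fun x => x) with
    | none => exact absurd ((PySem.List.min?_eq_none_iff L (fun x => x)).mp hm) hL
    | some mv =>
      have h1 : mv ∈ L := PySem.List.min?_mem hm
      have h2 : ∀ y ∈ L, mv ≤ y := PySem.List.min?_isMin hm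
      have : mv = m := le_antisymm (h2 m hmL) (hmin mv h1)
      simp [this]
  -- decompose L at the first occurrence of m
  have hidx : ∃ k, PySem.List.index? L m = some k :=
    Option.isSome_iff_exists.mp ((PySem.List.index?_isSome_iff L m).mpr hmL)
  obtain ⟨k, hk⟩ := hidx
  obtain ⟨pre, suf, hLdec, hprelen, -⟩ := (PySem.List.index?_eq_some_iff L m k).mp hk
  -- the A-step list is a permutation of the filtered mapped tail
  have hset : L.set k 0 = pre ++ 0 :: suf := by
    rw [hLdec, ← hprelen, List.set_append_right _ _ (le_refl pre.length)]
    simp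
  have htperm : (pre ++ suf).Perm t := by
    have h1 : (m :: (pre ++ suf)).Perm (pre ++ m :: suf) := (List.perm_middle).symm
    have h2 : (m :: (pre ++ suf)).Perm (m :: t) := by
      rw [← hLdec] at h1; exact h1.trans hperm.symm
    exact h2.cons_inv
  have hstepperm : (comSortStep L).Perm ((t.map (fun x => x - 1)).filter (fun x => decide (0 < x))) := by
    unfold comSortStep
    rw [hmv, hk, Option.getD_some, hset]
    have : ((pre ++ 0 :: suf).map (fun x => x - 1)).filter (fun x => decide (0 < x)) =
        ((pre ++ suf).map (fun x => x - 1)).filter (fun x => decide (0 < x)) := by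
      simp [List.filter_append]
    rw [this]
    exact (htperm.map _).filter _
  -- that filtered mapped tail is ≤-sorted
  have hts : t.Pairwise (· ≤ ·) := by
    have := PySem.List.sorted_pairwise L (fun x => x)
    rw [hst] at this
    exact this.tail
  have hsorted : ((t.map (fun x => x - 1)).filter (fun x => decide (0 < x))).Pairwise (· ≤ ·) :=
    List.Pairwise.sublist List.filter_sublist (hts.map (fun x => x - 1) (fun a b hab => by dsimp only; omega))
  exact PySem.List.sorted_id_eq_of_perm_of_pairwise _ _ hstepperm.symm hsorted

-- one A-step on the B side
theorem pv_alt_step (L : List Int) (hL : L ≠ []) :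
    comSort_alt L = 1 + comSort_alt (comSortStep L) := by
  obtain ⟨m, t, hst⟩ : ∃ m t, PySem.List.sorted L (fun x => x) false = m :: t := by
    cases h : PySem.List.sorted L (fun x => x) false with
    | nil => exact absurd ((PySem.List.sorted_eq_nil_iff L (fun x => x) false).mp h) hL
    | cons m t => exact ⟨m, t, rfl⟩
  have hts : t.Pairwise (· ≤ ·) := by
    have := PySem.List.sorted_pairwise L (fun x => x)
    rw [hst] at this; exact this.tail
  unfold comSort_alt
  rw [hst, pv_sorted_step L m t hst]
  show (m :: t).foldl pvF 0 = 1 + _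
  rw [List.foldl_cons]
  have h0 : pvF 0 m = 1 := by unfold pvF; omega
  rw [h0]
  have := pv_fold_step t hts 1 le_rfl (fun _ _ _ => rfl)
  simpa using this

theorem pv_main : ∀ (L : List Int), comSort L = comSort_alt L := by
  intro L
  induction hn : L.length using Nat.strong_induction_on generalizing L with
  | _ n ih =>
    by_cases hL : L = []
    · subst hL
      simp [comSort, comSort_alt, PySem.List.sorted]
    · rw [comSort]
      have hlen : ¬ L.length = 0 := by simpa [List.length_eq_zero_iff] using hL
      rw [if_neg hlen, pv_alt_step L hL,
        ih (comSortStep L).length (by rw [← hn]; exact comSortStep_length_lt L hL) _ rfl]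

-- ===== VERDICT (by name: the statement is the Claim_ definition above) =====
theorem comSort_spec : Claim_equal_comSort := by
  intro L _
  unfold Spec_comSort
  exact pv_main L
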